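-- pv_equiv track=rewrite | github.com/kgalloway2/VSC-Code | python stuff/sushigo.py | score_maki
-- ===== SOURCE A (Python) =====
-- def score_maki(selected_cards):
--     num_maki = []
--     result1 = []
--     result2 = []
--     for i in selected_cards:
--         num_maki.append(i.count("maki1") + i.count("maki2") * 2 + i.count("maki3") * 3)
--
--     # find persons(s) with max maki
--     max_maki = max(num_maki)
--     if num_maki.count(max_maki) > 1:
--         people_with_max = []
--         num_people_with_max = 0
--         for j in num_maki:
--             people_with_max.append(False)
--             if j == max_maki:
--                 people_with_max[-1] = True
--                 num_people_with_max += 1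
--         num_points_for_max = 6  // num_people_with_max
--
--         for i in range(len(people_with_max)):
--             if people_with_max[i]:
--                 result1.append({i: num_points_for_max})
--
--     elif num_maki.count(max_maki) == 1:
--         person_with_max = num_maki.index(max_maki)
--         num_points_for_max = 6
--         result1.append({person_with_max: num_points_for_max})
--
--     # find person(s) with second most maki
--     if len(result1) == 1:
--         # calculate result2
--         second_max = 0
--         for i in num_maki:
--             if i > second_max and i < max_maki:
--                 second_max = i
--         if num_maki.count(second_max) > 1:
--
--             people_with_second_max = []
--             num_people_with_second_max = 0
--             for j in num_maki:
--                 people_with_second_max.append(False)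
--                 if j == second_max:
--                     people_with_second_max[-1] = True
--                     num_people_with_second_max += 1
--             num_points_for_second_max = 6  // num_people_with_second_max
--
--             for i in range(len(people_with_second_max)):
--                 if people_with_second_max[i]:
--                     result2.append({i: num_points_for_second_max})
--
--         elif num_maki.count(second_max) == 1:
--             person_with_second_max = num_maki.index(second_max)
--             num_points_for_second_max = 6
--             result2.append({person_with_second_max: num_points_for_second_max})
--
--     return result1, result2
-- ===== SOURCE B (Python) =====
-- def score_maki(selected_cards):
--     num_maki = [c.count("maki1") + c.count("maki2") * 2 + c.count("maki3") * 3
--                 for c in selected_cards]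
--     groups = {}
--     for i, n in enumerate(num_maki):
--         groups[n] = groups.get(n, []) + [i]
--     max_maki = max(num_maki)
--     top = groups[max_maki]
--     points = 6 // len(top)
--     result1 = [{i: points} for i in top]
--     result2 = []
--     if len(top) == 1:
--         second = max([v for v in groups if 0 < v < max_maki], default=0)
--         grp = groups.get(second, [])
--         if grp:
--             pts2 = 6 // len(grp)
--             result2 = [{i: pts2} for i in grp]
--     return result1, result2
-- ===== Notes on version B (the rewrite author's own statement) =====
-- stated objective: idiomatic
-- what changed: B replaces A's boolean-mask loops, repeated count() passes and list.index() calls by a single dict grouping each maki score to its ordered list of player indices, then awards points by mapping over the looked-up groups.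
-- outside the precondition, e.g. on score_maki([]): A raises ValueError, B raises ValueError
import Mathlib
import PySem

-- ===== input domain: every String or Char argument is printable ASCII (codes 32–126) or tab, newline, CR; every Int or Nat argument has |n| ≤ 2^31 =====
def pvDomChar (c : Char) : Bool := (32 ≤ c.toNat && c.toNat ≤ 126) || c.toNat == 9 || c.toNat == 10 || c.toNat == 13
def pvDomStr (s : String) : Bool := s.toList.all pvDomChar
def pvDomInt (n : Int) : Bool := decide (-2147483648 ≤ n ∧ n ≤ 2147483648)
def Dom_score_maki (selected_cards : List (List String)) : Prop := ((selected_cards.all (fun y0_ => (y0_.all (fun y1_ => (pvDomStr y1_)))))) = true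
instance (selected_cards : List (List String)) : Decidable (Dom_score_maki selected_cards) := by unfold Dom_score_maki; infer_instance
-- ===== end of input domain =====

-- B replaces A's repeated count/index/boolean-mask passes by one dict grouping each
-- maki score to its ordered list of player indices (objective: idiomatic/alternative).

-- ===== PORT A =====
-- the per-player maki score (shared literal expression of both Pythons)
def makiScore (i : List String) : Int :=
  (PySem.List.count i "maki1" : Int) + (PySem.List.count i "maki2" : Int) * 2 + (PySem.List.count i "maki3" : Int) * 3

-- A's boolean-mask loop: append False, flip to True and count when equal
def maskLoop (num_maki : List Int) (v : Int) : List Bool × Int :=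
  num_maki.foldl (fun (s : List Bool × Int) j =>
    if j = v then (s.1 ++ [true], s.2 + 1) else (s.1 ++ [false], s.2)) ([], 0)

-- A's 'for i in range(len(mask)): if mask[i]: result.append({i: pts})'
def awardLoop (mask : List Bool) (pts : Int) : List (List (Int × Int)) :=
  (PySem.List.pyRange 0 (mask.length : Int) 1).foldl
    (fun r i => if PySem.List.pyGetD mask i false then r ++ [[(i, pts)]] else r) []

def score_maki (selected_cards : List (List String)) : (List (List (Int × Int))) × (List (List (Int × Int))) :=
  let num_maki : List Int := selected_cards.foldl (fun acc i => acc ++ [makiScore i]) []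
  match PySem.List.max? num_maki (fun x => x) with
  | none => ([], [])   -- max([]) raises ValueError; excluded by Pre_
  | some max_maki =>
    let result1 : List (List (Int × Int)) :=
      if PySem.List.count num_maki max_maki > 1 then
        let st := maskLoop num_maki max_maki
        awardLoop st.1 (PySem.Int.floordiv 6 st.2)
      else if PySem.List.count num_maki max_maki = 1 then
        [[( (((PySem.List.index? num_maki max_maki).getD 0 : Nat) : Int), 6)]]
      else []
    let result2 : List (List (Int × Int)) :=
      if result1.length = 1 then
        let second_max := num_maki.foldl (fun s i => if i > s ∧ i < max_maki then i else s) 0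
        if PySem.List.count num_maki second_max > 1 then
          let st := maskLoop num_maki second_max
          awardLoop st.1 (PySem.Int.floordiv 6 st.2)
        else if PySem.List.count num_maki second_max = 1 then
          [[( (((PySem.List.index? num_maki second_max).getD 0 : Nat) : Int), 6)]]
        else []
      else []
    (result1, result2)

-- ===== PORT B =====
def score_maki_alt (selected_cards : List (List String)) : (List (List (Int × Int))) × (List (List (Int × Int))) :=
  let num_maki : List Int := selected_cards.map makiScore
  let groups : PySem.Dict Int (List Int) :=
    (PySem.List.enumerate num_maki 0).foldl
      (fun d p => d.modify p.2 [] (fun g => g ++ [p.1])) PySem.Dict.empty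
  match PySem.List.max? num_maki (fun x => x) with
  | none => ([], [])   -- max([]) raises ValueError; excluded by Pre_
  | some max_maki =>
    let top := groups.getD max_maki []
    let points := PySem.Int.floordiv 6 (top.length : Int)
    let result1 := top.map (fun i => [(i, points)])
    let result2 : List (List (Int × Int)) :=
      if top.length = 1 then
        let second := (PySem.List.max? (groups.keys.filter (fun v => decide (0 < v) && decide (v < max_maki))) (fun x => x)).getD 0
        let grp := groups.getD second []
        if grp ≠ [] then grp.map (fun i => [(i, PySem.Int.floordiv 6 (grp.length : Int))]) else []
      else []
    (result1, result2)

-- ===== PRECONDITION & SPEC =====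
-- Pre_ excludes only the empty list, on which A's max(num_maki) raises ValueError (B raises there too).
def Pre_score_maki (selected_cards : List (List String)) : Prop := selected_cards ≠ []
instance (selected_cards : List (List String)) : Decidable (Pre_score_maki selected_cards) := by unfold Pre_score_maki; infer_instance
def pvWitness_score_maki : List (List String) := [["maki1"], ["maki2", "x"]]
def Spec_score_maki (selected_cards : List (List String)) (out : (List (List (Int × Int))) × (List (List (Int × Int)))) : Prop := out = score_maki_alt selected_cards
instance (selected_cards : List (List String)) (out : (List (List (Int × Int))) × (List (List (Int × Int)))) : Decidable (Spec_score_maki selected_cards out) := by unfold Spec_score_maki; infer_instance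

-- ===== CLAIM (what is proved, stated in full; the proofs are below) =====
def Claim_equal_score_maki : Prop := ∀ (selected_cards : List (List String)), Dom_score_maki selected_cards → Pre_score_maki selected_cards → Spec_score_maki selected_cards (score_maki selected_cards)


-- ===== LEMMAS AND PROOFS =====

-- A's append loop is a map
theorem numA_eq (sc : List (List String)) :
    sc.foldl (fun acc i => acc ++ [makiScore i]) [] = sc.map makiScore := by
  simpa using PySem.List.foldl_append_singleton_eq_map (f := makiScore) (l := sc) (acc := [])

-- A's boolean-mask loop computes the equality mask and the count
theorem maskLoop_aux (v : Int) (l : List Int) : ∀ (pw : List Bool) (n : Int),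
    l.foldl (fun (s : List Bool × Int) j =>
      if j = v then (s.1 ++ [true], s.2 + 1) else (s.1 ++ [false], s.2)) (pw, n)
    = (pw ++ l.map (fun j => decide (j = v)), n + (l.count v : Int)) := by
  induction l with
  | nil => intro pw n; simp
  | cons x t ih =>
    intro pw n
    by_cases hx : x = v
    · simp [hx, ih, add_comm, add_left_comm]
    · simp [hx, ih]

theorem maskLoop_eq (l : List Int) (v : Int) :
    maskLoop l v = (l.map (fun j => decide (j = v)), (l.count v : Int)) := by
  simpa using maskLoop_aux v l [] 0

-- A's range-indexed award loop filters the enumerated mask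
theorem awardLoop_eq (mask : List Bool) (pts : Int) :
    awardLoop mask pts
    = ((PySem.List.enumerate mask 0).filter (fun p => p.2)).map (fun p => [(p.1, pts)]) := by
  unfold awardLoop
  rw [PySem.List.foldl_append_if (p := fun i => PySem.List.pyGetD mask i false)
    (f := fun i => ([(i, pts)] : List (Int × Int)))]
  rw [PySem.List.enumerate_eq_map_pyRange (d := false), List.filter_map, List.map_map]
  simp [Function.comp_def, PySem.List.len_eq]

theorem enumerate_map {α β : Type} (f : α → β) (l : List α) : ∀ (s : Int),
    PySem.List.enumerate (l.map f) s = (PySem.List.enumerate l s).map (fun p => (p.1, f p.2)) := by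
  induction l with
  | nil => intro s; simp [PySem.List.enumerate_nil]
  | cons x t ih => intro s; simp [PySem.List.enumerate_cons, ih]

-- the ordered indices of players whose score is v
def idxs (l : List Int) (v : Int) : List Int :=
  ((PySem.List.enumerate l 0).filter (fun p => p.2 == v)).map (fun p => p.1)

theorem len_filter_enumerate (v : Int) (l : List Int) : ∀ (s : Int),
    ((PySem.List.enumerate l s).filter (fun p => p.2 == v)).length = l.count v := by
  induction l with
  | nil => intro s; simp [PySem.List.enumerate_nil]
  | cons x t ih =>
    intro s
    by_cases hx : x = v
    · simp [PySem.List.enumerate_cons, hx, ih]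
    · simp [PySem.List.enumerate_cons, hx, ih]

theorem len_idxs (l : List Int) (v : Int) : (idxs l v).length = l.count v := by
  simpa [idxs] using len_filter_enumerate v l 0

theorem idxs_count_one_aux (v : Int) (l : List Int) : ∀ (s : Int), l.count v = 1 →
    ((PySem.List.enumerate l s).filter (fun p => p.2 == v)).map (fun p => p.1)
    = [s + (((PySem.List.index? l v).getD 0 : Nat) : Int)] := by
  induction l with
  | nil => intro s h; simp at h
  | cons x t ih =>
    intro s h
    by_cases hx : x = v
    · subst hx
      have ht : t.count x = 0 := by
        rw [List.count_cons] at h; simp at h; omega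
      have hnil : (PySem.List.enumerate t (s + 1)).filter (fun p => p.2 == x) = [] := by
        have hlen := len_filter_enumerate x t (s + 1)
        rw [ht] at hlen
        exact List.eq_nil_of_length_eq_zero hlen
      rw [PySem.List.enumerate_cons, PySem.List.index?_cons_self]
      simp [hnil]
    · have ht : t.count v = 1 := by
        have hne : ((x == v) = false) := by simp [hx]
        rw [List.count_cons, hne] at h; simpa using h
      have hmem : v ∈ t := List.count_pos_iff.mp (by omega : 0 < t.count v)
      obtain ⟨k, hk⟩ : ∃ k, PySem.List.index? t v = some k :=
        Option.isSome_iff_exists.mp ((PySem.List.index?_isSome_iff (xs := t) (v := v)).mpr hmem)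
      rw [PySem.List.enumerate_cons]
      have hfc : List.filter (fun p => p.2 == v) ((s, x) :: PySem.List.enumerate t (s + 1))
          = List.filter (fun p => p.2 == v) (PySem.List.enumerate t (s + 1)) := by
        simp [hx]
      rw [hfc, ih (s + 1) ht, PySem.List.index?_cons_of_ne t hx, hk]
      simp only [Option.map_some, Option.getD_some, List.cons.injEq, and_true]
      push_cast
      ring

theorem idxs_count_one (l : List Int) (v : Int) (h : l.count v = 1) :
    idxs l v = [(((PySem.List.index? l v).getD 0 : Nat) : Int)] := by
  simpa [idxs] using idxs_count_one_aux v l 0 h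

-- B's grouping dict: lookup gives the ordered index list
theorem groups_getD (nm : List Int) (v : Int) :
    ((PySem.List.enumerate nm 0).foldl
      (fun d p => d.modify p.2 [] (fun g => g ++ [p.1])) PySem.Dict.empty).getD v []
    = idxs nm v := by
  have hswap :
      (PySem.List.enumerate nm 0).foldl (fun d p => d.modify p.2 [] (fun g => g ++ [p.1])) PySem.Dict.empty
      = ((PySem.List.enumerate nm 0).map (fun p => (p.2, p.1))).foldl
          (fun d q => d.modify q.1 [] (fun g => g ++ [q.2])) PySem.Dict.empty := by
    rw [List.foldl_map]
  rw [hswap, PySem.Dict.getD_foldl_modify_append]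
  simp [idxs, List.filter_map, Function.comp_def, List.map_map]

theorem groups_keys (nm : List Int) :
    ((PySem.List.enumerate nm 0).foldl
      (fun d p => d.modify p.2 [] (fun g => g ++ [p.1])) PySem.Dict.empty).keys
    = PySem.List.dedup nm := by
  rw [PySem.Dict.keys_foldl_modify_key (key := fun p : Int × Int => p.2)]
  simp [PySem.List.map_snd_enumerate, PySem.Set.update, PySem.List.dedup_eq_ofList,
    PySem.Set.ofList, PySem.Dict.keys_empty]

-- A's running second-max loop is a fold of max over the filtered list
theorem secondA_fold (mx : Int) (l : List Int) : ∀ (s : Int),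
    l.foldl (fun a i => if i > a ∧ i < mx then i else a) s
    = (l.filter (fun i => decide (i < mx))).foldl max s := by
  induction l with
  | nil => intro s; simp
  | cons x t ih =>
    intro s
    by_cases hx : x < mx
    · by_cases hs : x > s
      · simp [hx, hs, ih, max_eq_right (le_of_lt hs)]
      · simp [hx, hs, ih, max_eq_left (by omega : x ≤ s)]
    · simp [hx, ih]

theorem second_eq (nm : List Int) (mx : Int) (ks : List Int)
    (hk : ∀ x, x ∈ ks ↔ x ∈ nm) :
    nm.foldl (fun a i => if i > a ∧ i < mx then i else a) 0
    = (PySem.List.max? (ks.filter (fun v => decide (0 < v) && decide (v < mx))) (fun x => x)).getD 0 := by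
  rw [secondA_fold]
  set F := nm.filter (fun i => decide (i < mx)) with hF
  set A := F.foldl max 0 with hA
  have hA0 : 0 ≤ A := (PySem.List.le_foldl_max F 0).1
  have hAub : ∀ y ∈ F, y ≤ A := (PySem.List.le_foldl_max F 0).2
  have hAmem : A = 0 ∨ A ∈ F := PySem.List.foldl_max_mem F 0
  cases hks : ks.filter (fun v => decide (0 < v) && decide (v < mx)) with
  | nil =>
    simp only [PySem.List.max?, Option.getD]
    -- show A = 0
    rcases hAmem with h0 | hmem
    · simpa [PySem.List.max?] using h0
    · have hAlt : A < mx := by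
        have := List.of_mem_filter hmem; simpa using this
      have hAnm : A ∈ nm := List.mem_of_mem_filter hmem
      have hApos : ¬ (0 < A) := by
        intro hpos
        have : A ∈ ks.filter (fun v => decide (0 < v) && decide (v < mx)) := by
          rw [List.mem_filter]
          exact ⟨(hk A).mpr hAnm, by simp [hpos, hAlt]⟩
        rw [hks] at this; simp at this
      have : A = 0 := le_antisymm (by omega) hA0
      simpa [PySem.List.max?] using this
  | cons k t =>
    rw [PySem.List.max?_id_cons]
    simp only [Option.getD_some]
    set B := t.foldl max k with hB
    have hBub : ∀ y ∈ k :: t, y ≤ B := by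
      intro y hy
      rcases hy with _ | hy
      · exact (PySem.List.le_foldl_max t k).1
      · exact (PySem.List.le_foldl_max t k).2 y (by assumption)
    have hBmem : B ∈ k :: t := by
      rcases PySem.List.foldl_max_mem t k with h | h
      · rw [hB, h]; exact List.mem_cons_self
      · rw [hB]; exact List.mem_cons_of_mem _ h
    have hBflt : B ∈ ks.filter (fun v => decide (0 < v) && decide (v < mx)) := by
      rw [hks]; exact hBmem
    have hBpos : 0 < B := by
      have := List.of_mem_filter hBflt; simp at this; exact this.1
    have hBlt : B < mx := by
      have := List.of_mem_filter hBflt; simp at this; exact this.2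
    have hBnm : B ∈ nm := (hk B).mp (List.mem_of_mem_filter hBflt)
    apply le_antisymm
    · rcases hAmem with h0 | hmem
      · omega
      · have hAlt : A < mx := by have := List.of_mem_filter hmem; simpa using this
        have hAnm : A ∈ nm := List.mem_of_mem_filter hmem
        by_cases hApos : 0 < A
        · have : A ∈ ks.filter (fun v => decide (0 < v) && decide (v < mx)) := by
            rw [List.mem_filter]
            exact ⟨(hk A).mpr hAnm, by simp [hApos, hAlt]⟩
          rw [hks] at this
          exact hBub A this
        · omega
    · exact hAub B (by rw [hF, List.mem_filter]; exact ⟨hBnm, by simp [hBlt]⟩)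


-- ===== VERDICT (by name: the statement is the Claim_ definition above) =====
theorem award_eq (nm : List Int) (v pts : Int) :
    awardLoop (nm.map (fun j => decide (j = v))) pts = (idxs nm v).map (fun i => [(i, pts)]) := by
  rw [awardLoop_eq, enumerate_map, List.filter_map]
  simp only [idxs, List.map_map, Function.comp_def]
  rw [List.filter_congr (q := fun p : Int × Int => p.2 == v) (fun x _ => by by_cases h : x.2 = v <;> simp [h])]

-- A's whole award branch (mask loop / single index / nothing) is B's map over the index group
theorem branch_eq (nm : List Int) (v : Int) :
    (if PySem.List.count nm v > 1 then
        awardLoop (maskLoop nm v).1 (PySem.Int.floordiv 6 (maskLoop nm v).2)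
      else if PySem.List.count nm v = 1 then
        [[((((PySem.List.index? nm v).getD 0 : Nat) : Int), 6)]]
      else [])
    = (idxs nm v).map (fun i => [(i, PySem.Int.floordiv 6 ((idxs nm v).length : Int))]) := by
  simp only [PySem.List.count_eq]
  rcases Nat.lt_or_ge 1 (nm.count v) with hc | hc
  · rw [if_pos hc, maskLoop_eq]
    simp only
    rw [award_eq]
    simp [len_idxs]
  · rcases Nat.le_one_iff_eq_zero_or_eq_one.mp hc with hc0 | hc1
    · have hnil : idxs nm v = [] := by
        have := len_idxs nm v
        rw [hc0] at this
        exact List.eq_nil_of_length_eq_zero this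
      rw [if_neg (by omega), if_neg (by omega), hnil]
      simp
    · rw [if_neg (by omega), if_pos hc1, idxs_count_one nm v hc1]
      simp

theorem score_maki_spec : Claim_equal_score_maki := by
  intro sc _hdom _hpre
  show score_maki sc = score_maki_alt sc
  unfold score_maki score_maki_alt
  simp only [numA_eq]
  cases hmx : PySem.List.max? (sc.map makiScore) (fun x => x) with
  | none => rfl
  | some mx =>
    simp only [groups_getD, groups_keys]
    set nm := List.map makiScore sc with hnm
    have hsec := second_eq nm mx (PySem.List.dedup nm)
      (fun x => PySem.List.mem_dedup (x := x) (xs := nm))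
    rw [branch_eq nm mx, hsec, List.length_map]
    set sd := (PySem.List.max? ((PySem.List.dedup nm).filter
      (fun v => decide (0 < v) && decide (v < mx))) (fun x => x)).getD 0 with hsd
    rw [branch_eq nm sd]
    by_cases hg : idxs nm sd = [] <;> simp [hg]
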